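-- pv_equiv track=rewrite | github.com/eligum/FIB-CDI-lab | lab-3/functions.py | source_from_text
-- ===== SOURCE A (Python) =====
-- Source = list[tuple[str, int | float]]
--
-- def source_from_text(text: str, k: int = 1, pre: str = "") -> Source:
--     """Returns the frequency of each block in the string.
--
--     `k` is the number of characters from the `text` that are considered to be a block.
--     `pre` is the prefix that every block must have in order to be considered one.
--     """
--     freq = dict()
--     pre_len = len(pre)
--     n = len(text)
--     i = 0
--     j = 0
--
--     while j < n:
--         if pre != "":
--             i = text.find(pre, i)
--             if i < 0:
--                 break
--         j = i + pre_len + k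
--         if j <= n:
--             block = text[(i + pre_len):j]
--             freq[block] = freq.get(block, 0) + 1
--         i += 1
--
--     return sorted(freq.items())
-- ===== SOURCE B (Python) =====
-- def source_from_text(text: str, k: int = 1, pre: str = ""):
--     """Frequency of each k-char block following `pre`, as sorted items."""
--     freq = {}
--     L = len(pre)
--     n = len(text)
--     for p in range(n + 1):
--         if p + L + k <= n and text.startswith(pre, p):
--             block = text[p + L : p + L + k]
--             freq[block] = freq.get(block, 0) + 1
--     return sorted(freq.items())
-- ===== Notes on version B (the rewrite author's own statement) =====
-- stated objective: simpler
-- what changed: Replaces A's stateful while-loop that jumps between occurrences with str.find and a carried j from the previous iteration by a single uniform for-loop over the candidate start positions range(len(text)-len(pre)-k+1) with a startswith test, with no empty-prefix special case.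
-- intended difference: When pre is empty and k is negative (or k <= 0 on empty text), A's loop keeps scanning start positions past the end of the text and counts -k extra phantom empty blocks (e.g. [('', 3), ('a', 1)] on ('ab', -1, '')); B counts only the real start positions 0..len(text) (returning [('', 2), ('a', 1)] there), the intended occurrence count. — e.g. on source_from_text("ab", -1, ""): A returns [("", 3), ("a", 1)], B returns [("", 2), ("a", 1)]
import Mathlib
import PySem

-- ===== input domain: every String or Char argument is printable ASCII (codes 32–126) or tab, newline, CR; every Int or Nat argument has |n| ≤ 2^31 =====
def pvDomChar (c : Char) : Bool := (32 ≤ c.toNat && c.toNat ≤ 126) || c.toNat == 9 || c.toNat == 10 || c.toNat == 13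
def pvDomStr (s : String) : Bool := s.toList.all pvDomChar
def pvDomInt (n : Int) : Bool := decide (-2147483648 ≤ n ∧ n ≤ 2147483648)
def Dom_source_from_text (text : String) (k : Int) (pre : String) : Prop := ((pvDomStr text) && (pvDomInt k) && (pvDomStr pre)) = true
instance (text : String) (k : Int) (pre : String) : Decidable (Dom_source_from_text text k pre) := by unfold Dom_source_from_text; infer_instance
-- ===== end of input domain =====

-- B replaces A's find-driven while loop by one uniform scan of the candidate start
-- positions with a startswith test (objective: simpler); return values agree outside D_ below.

-- ===== PORT A =====
-- A's while loop, transliterated with a fuel parameter. The fuel chosen at the call site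
-- (len(text) + |k| + 2) is provably sufficient: i strictly increases each iteration and the
-- loop stops as soon as j ≥ len(text) or the prefix is no longer found.
-- sorted(freq.items()) is ported as sorted2 on (key, value); Python compares the string keys
-- by code points, i.e. by the lexicographic order on their character lists (.toList).
def srcLoop (text pre : String) (k : Int) : Nat → PySem.Dict String Int → Int → Int → PySem.Dict String Int
  | 0, d, _, _ => d
  | fuel+1, d, i, j =>
    if j < PySem.Str.len text then
      -- if pre != "": i = text.find(pre, i); if i < 0: break
      let i' := if pre = "" then i else PySem.Str.findFrom text pre i none
      if decide (pre ≠ "") && decide (i' < 0) then d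
      else
        -- j = i + pre_len + k
        let j' := i' + PySem.Str.len pre + k
        -- if j <= n: block = text[i+pre_len : j]; freq[block] = freq.get(block, 0) + 1
        let d' := if j' ≤ PySem.Str.len text then
            let block := PySem.Str.slice text (some (i' + PySem.Str.len pre)) (some j')
            d.insert block (d.getD block 0 + 1)
          else d
        srcLoop text pre k fuel d' (i' + 1) j'
    else d

def source_from_text (text : String) (k : Int) (pre : String) : List (String × Int) :=
  let d := srcLoop text pre k (text.toList.length + k.natAbs + 2) PySem.Dict.empty 0 0
  PySem.List.sorted2 d.items (fun p => p.1.toList) (fun p => p.2)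

-- ===== PORT B =====
-- hand port of Python's text.startswith(pre, p) for 0 ≤ p, exact there: Python returns
-- False when p > len(text) (even for pre == ""), otherwise tests pre against text[p:].
def startsAt (s pre : String) (p : Int) : Bool :=
  decide (p ≤ PySem.Str.len s) && PySem.Chars.startswith (s.toList.drop p.toNat) pre.toList

def source_from_text_alt (text : String) (k : Int) (pre : String) : List (String × Int) :=
  let n := PySem.Str.len text
  let L := PySem.Str.len pre
  let freq := (PySem.List.pyRange 0 (n + 1) 1).foldl
    (fun d p =>
      if decide (p + L + k ≤ n) && startsAt text pre p then
        let block := PySem.Str.slice text (some (p + L)) (some (p + L + k))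
        d.insert block (d.getD block 0 + 1)
      else d)
    PySem.Dict.empty
  PySem.List.sorted2 freq.items (fun p => p.1.toList) (fun p => p.2)

-- ===== PRECONDITION & SPEC =====
-- With pre == "" and k < 0 (or k ≤ 0 on empty text), A keeps scanning start positions past
-- the end of the text and counts -k phantom extra empty blocks (e.g. [('', 3), ('a', 1)] on
-- ("ab", -1, "")), while B counts only the real start positions 0..len(text), the intended
-- occurrence count ([('', 2), ('a', 1)]).
def D_source_from_text (text : String) (k : Int) (pre : String) : Prop :=
  pre = "" ∧ ((k < 0 ∧ text ≠ "") ∨ (k ≤ 0 ∧ text = ""))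
instance (text : String) (k : Int) (pre : String) : Decidable (D_source_from_text text k pre) := by
  unfold D_source_from_text; infer_instance

def Spec_source_from_text (text : String) (k : Int) (pre : String) (out : List (String × Int)) : Prop :=
  ¬ D_source_from_text text k pre → out = source_from_text_alt text k pre
instance (text : String) (k : Int) (pre : String) (out : List (String × Int)) : Decidable (Spec_source_from_text text k pre out) := by
  unfold Spec_source_from_text; infer_instance

def pvDiffWitness_source_from_text : String × Int × String := ("ab", -1, "")
def pvDiffWitnessOut_source_from_text : (List (String × Int)) × (List (String × Int)) :=
  ([("", 3), ("a", 1)], [("", 2), ("a", 1)])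

-- ===== CLAIM (what is proved, stated in full; the proofs are below) =====
def Claim_unchanged_source_from_text : Prop := ∀ (text : String) (k : Int) (pre : String), Dom_source_from_text text k pre → Spec_source_from_text text k pre (source_from_text text k pre)
def Claim_exact_source_from_text : Prop := ∀ (text : String) (k : Int) (pre : String), Dom_source_from_text text k pre → D_source_from_text text k pre → source_from_text text k pre ≠ source_from_text_alt text k pre
def Claim_changed_source_from_text : Prop := Dom_source_from_text (pvDiffWitness_source_from_text.1) (pvDiffWitness_source_from_text.2.1) (pvDiffWitness_source_from_text.2.2) ∧ D_source_from_text (pvDiffWitness_source_from_text.1) (pvDiffWitness_source_from_text.2.1) (pvDiffWitness_source_from_text.2.2) ∧ source_from_text (pvDiffWitness_source_from_text.1) (pvDiffWitness_source_from_text.2.1) (pvDiffWitness_source_from_text.2.2) = pvDiffWitnessOut_source_from_text.1 ∧ source_from_text_alt (pvDiffWitness_source_from_text.1) (pvDiffWitness_source_from_text.2.1) (pvDiffWitness_source_from_text.2.2) = pvDiffWitnessOut_source_from_text.2 ∧ pvDiffWitnessOut_source_from_text.1 ≠ pvDiffWitnessOut_source_from_text.2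

-- ===== LEMMAS AND PROOFS =====

-- the filtered candidate positions from i upward (B scans them from 0)
def okPos (text pre : String) (k : Int) (i : Int) : List Int :=
  (PySem.List.pyRange i (PySem.Str.len text - PySem.Str.len pre - k + 1) 1).filter (startsAt text pre)

-- the counting step both loops perform at a counted position
def insB (text pre : String) (k : Int) (d : PySem.Dict String Int) (p : Int) : PySem.Dict String Int :=
  d.insert (PySem.Str.slice text (some (p + PySem.Str.len pre)) (some (p + PySem.Str.len pre + k)))
    ((d.getD (PySem.Str.slice text (some (p + PySem.Str.len pre)) (some (p + PySem.Str.len pre + k))) 0) + 1)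

lemma startsAt_eq_false_of_gt (text pre : String) (p : Int)
    (h : PySem.Str.len text < p) : startsAt text pre p = false := by
  unfold startsAt
  rw [decide_eq_false (not_le.mpr h), Bool.false_and]

-- B's scan of positions 0..n with an explicit fit test visits exactly the positions of okPos 0
lemma bList_eq (text pre : String) (k : Int) :
    (PySem.List.pyRange 0 (PySem.Str.len text + 1)).filter
        (fun p => decide (p + PySem.Str.len pre + k ≤ PySem.Str.len text) && startsAt text pre p)
      = okPos text pre k 0 := by
  unfold okPos
  set N := PySem.Str.len text with hN
  set L := PySem.Str.len pre with hLd
  set m := N - L - k + 1 with hm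
  have hN0 : (0:Int) ≤ N := by rw [hN, PySem.Str.len_eq]; omega
  by_cases h1 : m ≤ N + 1
  · by_cases h2 : 0 ≤ m
    · rw [PySem.List.pyRange_one_append 0 m (N+1) h2 h1, List.filter_append]
      have htail : (PySem.List.pyRange m (N+1)).filter
          (fun p => decide (p + L + k ≤ N) && startsAt text pre p) = [] := by
        rw [List.filter_eq_nil_iff]
        intro p hp
        have hpr := PySem.List.mem_pyRange_one.mp hp
        simp only [decide_eq_false (by omega : ¬ p + L + k ≤ N), Bool.false_and,
          Bool.false_eq_true, not_false_eq_true]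
      rw [htail, List.append_nil]
      apply List.filter_congr
      intro p hp
      have hpr := PySem.List.mem_pyRange_one.mp hp
      rw [decide_eq_true (by omega : p + L + k ≤ N), Bool.true_and]
    · rw [PySem.List.pyRange_one_eq_nil (by omega : m ≤ 0), List.filter_nil,
        List.filter_eq_nil_iff]
      intro p hp
      have hpr := PySem.List.mem_pyRange_one.mp hp
      simp only [decide_eq_false (by omega : ¬ p + L + k ≤ N), Bool.false_and,
        Bool.false_eq_true, not_false_eq_true]
  · rw [PySem.List.pyRange_one_append 0 (N+1) m (by omega) (by omega), List.filter_append]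
    have htail : (PySem.List.pyRange (N+1) m).filter (startsAt text pre) = [] := by
      rw [List.filter_eq_nil_iff]
      intro p hp
      have hpr := PySem.List.mem_pyRange_one.mp hp
      simp only [startsAt_eq_false_of_gt text pre p (by omega), Bool.false_eq_true,
        not_false_eq_true]
    rw [htail, List.append_nil]
    apply List.filter_congr
    intro p hp
    have hpr := PySem.List.mem_pyRange_one.mp hp
    rw [decide_eq_true (by omega : p + L + k ≤ N), Bool.true_and]

lemma alt_eq_fold (text : String) (k : Int) (pre : String) :
    source_from_text_alt text k pre =
      PySem.List.sorted2 ((okPos text pre k 0).foldl (insB text pre k) PySem.Dict.empty).items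
        (fun p => p.1.toList) (fun p => p.2) := by
  simp only [source_from_text_alt, PySem.List.foldl_if_eq_foldl_filter]
  rw [bList_eq]
  rfl

lemma srcLoop_stop (text pre : String) (k : Int) (fuel : Nat) (d : PySem.Dict String Int)
    (i j : Int) (h : ¬ j < PySem.Str.len text) :
    srcLoop text pre k fuel d i j = d := by
  cases fuel
  · rfl
  · simp only [srcLoop]; rw [if_neg h]

lemma okPos_nil_of_ge (text pre : String) (k : Int) (i : Int)
    (h : PySem.Str.len text - PySem.Str.len pre - k + 1 ≤ i) :
    okPos text pre k i = [] := by
  unfold okPos; rw [PySem.List.pyRange_one_eq_nil h]; rfl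

lemma okPos_nil_of_none (text pre : String) (k : Int) (i : Int)
    (h : ∀ p : Int, i ≤ p → p < PySem.Str.len text - PySem.Str.len pre - k + 1 → startsAt text pre p = false) :
    okPos text pre k i = [] := by
  unfold okPos
  rw [List.filter_eq_nil_iff]
  intro p hp
  have := PySem.List.mem_pyRange_one.mp hp
  simp [h p this.1 this.2]

lemma startsAt_eq_true (text pre : String) (p : Int) (hn : p ≤ PySem.Str.len text)
    (hp : pre.toList <+: text.toList.drop p.toNat) : startsAt text pre p = true := by
  unfold startsAt
  rw [decide_eq_true hn, Bool.true_and, (PySem.Chars.startswith_iff _ _).mpr hp]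

lemma startsAt_eq_false (text pre : String) (p : Int)
    (h : ¬ pre.toList <+: text.toList.drop p.toNat) : startsAt text pre p = false := by
  unfold startsAt
  have hs : PySem.Chars.startswith (text.toList.drop p.toNat) pre.toList = false := by
    rw [Bool.eq_false_iff]
    intro hT
    exact h ((PySem.Chars.startswith_iff _ _).mp hT)
  rw [hs, Bool.and_false]

lemma srcLoop_eq (text pre : String) (k : Int) :
    ∀ (fuel : Nat) (d : PySem.Dict String Int) (i j : Int),
    0 ≤ i → i ≤ PySem.Str.len text → PySem.Str.len text < i + fuel →
    j < PySem.Str.len text → (pre = "" → 0 ≤ k) →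
    srcLoop text pre k fuel d i j = (okPos text pre k i).foldl (insB text pre k) d := by
  intro fuel
  induction fuel with
  | zero =>
    intro d i j h0 hn hf hj hk
    exfalso
    simp only [Nat.cast_zero, add_zero] at hf
    omega
  | succ f ih =>
    intro d i j h0 hn hf hj hk
    simp only [srcLoop]
    rw [if_pos hj]
    by_cases hpre : pre = ""
    · -- pre == "": no find; every position in range is counted
      subst hpre
      have hk0 : 0 ≤ k := hk rfl
      have hL : PySem.Str.len "" = 0 := rfl
      simp only [if_true, ne_eq, not_true_eq_false, decide_false,
        Bool.false_and, Bool.false_eq_true, if_false, hL, add_zero]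
      by_cases hfit : i + k ≤ PySem.Str.len text
      · -- counted; okPos i = i :: okPos (i+1)
        rw [if_pos hfit]
        have hcons : okPos text "" k i = i :: okPos text "" k (i + 1) := by
          unfold okPos
          rw [PySem.List.pyRange_one_cons (by simp only [hL]; omega)]
          rw [List.filter_cons_of_pos (startsAt_eq_true _ _ _ (by omega) (by simp))]
        rw [hcons]
        simp only [List.foldl_cons]
        have hins : insB text "" k d i
            = (PySem.Dict.insert d (PySem.Str.slice text (some i) (some (i + k)))
                ((PySem.Dict.getD d (PySem.Str.slice text (some i) (some (i + k))) 0) + 1)) := by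
          simp [insB]
        rw [← hins]
        by_cases hlt : i + k < PySem.Str.len text
        · exact ih _ (i+1) (i+k) (by omega) (by omega) (by push_cast at hf ⊢; omega) hlt hk
        · rw [srcLoop_stop text "" k f _ (i+1) (i+k) (by omega)]
          rw [okPos_nil_of_ge text "" k (i+1) (by simp only [hL]; omega)]
          rfl
      · -- i + k > n: nothing more is ever counted
        rw [if_neg hfit]
        rw [srcLoop_stop text "" k f d (i+1) (i+k) (by omega)]
        rw [okPos_nil_of_ge text "" k i (by simp only [hL]; omega)]
        rfl
    · -- pre != "": jump to the next occurrence with find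
      rw [if_neg hpre]
      have hps : pre.toList ≠ [] := fun h => hpre (String.toList_inj.mp (h.trans String.toList_empty.symm))
      have hlt : PySem.Str.len text = ↑text.toList.length := PySem.Str.len_eq text
      have hlp : PySem.Str.len pre = ↑pre.toList.length := PySem.Str.len_eq pre
      have hpsl : 0 < pre.toList.length := List.length_pos_iff.mpr hps
      have hiN : i.toNat ≤ text.toList.length := by omega
      have hicast : ((i.toNat : Nat) : Int) = i := Int.toNat_of_nonneg h0
      rw [PySem.Str.findFrom_eq]
      rw [show PySem.Chars.findFrom text.toList pre.toList i none
            = PySem.Chars.findFrom text.toList pre.toList ↑i.toNat none from by rw [hicast]]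
      by_cases hneg : PySem.Chars.findFrom text.toList pre.toList ↑i.toNat none = -1
      · -- no further occurrence: break, and no position ≥ i matches
        rw [hneg]
        rw [if_pos (by simp [hpre])]
        rw [okPos_nil_of_none]
        · rfl
        · intro p hip hpm
          apply startsAt_eq_false
          intro hpref
          have hno : ¬ pre.toList <:+: (text.toList.drop i.toNat) :=
            (PySem.Chars.findFrom_natCast_eq_neg_one_iff _ _ _ hiN).mp hneg
          apply hno
          have hdd : pre.toList <+: ((text.toList.drop i.toNat).drop (p.toNat - i.toNat)) := by
            rw [List.drop_drop, show i.toNat + (p.toNat - i.toNat) = p.toNat from by omega]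
            exact hpref
          exact (PySem.Chars.isIn_iff_infix _ _).mp
            ((PySem.Chars.exists_prefix_drop_iff_isIn _ _).mp ⟨_, hdd⟩)
      · -- an occurrence F ≥ i exists; it is the next counted candidate
        obtain ⟨hiF, hpref, hmin⟩ :=
          PySem.Chars.findFrom_natCast_spec text.toList pre.toList i.toNat hiN hneg
        set F := PySem.Chars.findFrom text.toList pre.toList ↑i.toNat none with hFdef
        have hF0 : 0 ≤ F := le_trans (by omega) hiF
        have hiF' : i ≤ F := by omega
        have hpl := hpref.length_le
        rw [List.length_drop] at hpl
        have hFN : F.toNat + pre.toList.length ≤ text.toList.length := by omega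
        rw [if_neg (by simp only [Bool.and_eq_true, decide_eq_true_eq]; rintro ⟨-, h⟩; omega)]
        by_cases hfit : F + PySem.Str.len pre + k ≤ PySem.Str.len text
        · rw [if_pos hfit]
          have hm : F < PySem.Str.len text - PySem.Str.len pre - k + 1 := by omega
          have hfilternil : (PySem.List.pyRange i F).filter (startsAt text pre) = [] := by
            rw [List.filter_eq_nil_iff]
            intro p hp
            have hpr := PySem.List.mem_pyRange_one.mp hp
            simp only [startsAt_eq_false text pre p
              (hmin p.toNat (by omega) (by omega)), Bool.false_eq_true, not_false_eq_true]
          have hcons : okPos text pre k i = F :: okPos text pre k (F + 1) := by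
            unfold okPos
            rw [PySem.List.pyRange_one_append i F _ hiF' (le_of_lt hm), List.filter_append,
              hfilternil, PySem.List.pyRange_one_cons hm,
              List.filter_cons_of_pos (startsAt_eq_true text pre F (by omega) hpref),
              List.nil_append]
          rw [hcons, List.foldl_cons]
          have hins : insB text pre k d F
              = d.insert (PySem.Str.slice text (some (F + PySem.Str.len pre)) (some (F + PySem.Str.len pre + k)))
                ((d.getD (PySem.Str.slice text (some (F + PySem.Str.len pre)) (some (F + PySem.Str.len pre + k))) 0) + 1) := rfl
          rw [← hins]
          by_cases hlt2 : F + PySem.Str.len pre + k < PySem.Str.len text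
          · exact ih _ (F+1) _ (by omega) (by omega) (by push_cast at hf ⊢; omega) hlt2 hk
          · rw [srcLoop_stop text pre k f _ (F+1) _ (by omega)]
            rw [okPos_nil_of_ge text pre k (F+1) (by omega)]
            rfl
        · -- this occurrence does not fit; neither does any later one
          rw [if_neg hfit]
          rw [srcLoop_stop text pre k f d (F+1) _ (by omega)]
          rw [okPos_nil_of_none]
          · rfl
          · intro p hip hpm
            exact startsAt_eq_false text pre p (hmin p.toNat (by omega) (by omega))

-- a slice starting at or past the end of the text is empty
lemma block_empty_of_ge (text : String) (k p : Int) (hp0 : 0 ≤ p)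
    (hp : (text.toList.length : Int) ≤ p) :
    PySem.Str.slice text (some p) (some (p + k)) = "" := by
  have hbridge : (PySem.Str.slice text (some p) (some (p + k))).toList
      = PySem.List.slice text.toList (some p) (some (p + k)) := by
    simp [PySem.Str.slice]
  have h1 : PySem.List.clampIdx text.toList.length p = text.toList.length := by
    rw [show p = ((p.toNat : Nat) : Int) from (Int.toNat_of_nonneg hp0).symm,
      PySem.List.clampIdx_natCast]
    omega
  have h2 := PySem.List.clampIdx_le text.toList.length (p + k)
  have hlen : (PySem.List.slice text.toList (some p) (some (p + k))).length = 0 := by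
    rw [PySem.List.length_slice, h1]
    omega
  have hnil : (PySem.Str.slice text (some p) (some (p + k))).toList = [] := by
    rw [hbridge]
    exact List.length_eq_zero_iff.mp hlen
  exact String.toList_inj.mp (hnil.trans String.toList_empty.symm)

-- A's loop for pre == "" and k < 0: every position 0..n-k is counted
lemma srcLoop_neg_eq (text : String) (k : Int) (hk : k < 0) :
    ∀ (fuel : Nat) (d : PySem.Dict String Int) (i j : Int),
    0 ≤ i → PySem.Str.len text - k < i + fuel → j < PySem.Str.len text →
    srcLoop text "" k fuel d i j
      = (PySem.List.pyRange i (PySem.Str.len text - k + 1) 1).foldl (insB text "" k) d := by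
  intro fuel
  induction fuel with
  | zero =>
    intro d i j h0 hf hj
    simp only [Nat.cast_zero, add_zero] at hf
    rw [PySem.List.pyRange_one_eq_nil (by omega)]
    rfl
  | succ f ih =>
    intro d i j h0 hf hj
    simp only [srcLoop]
    rw [if_pos hj]
    have hL : PySem.Str.len "" = 0 := rfl
    simp only [if_true, ne_eq, not_true_eq_false, decide_false,
      Bool.false_and, Bool.false_eq_true, if_false, hL, add_zero]
    have hins : insB text "" k d i
        = (PySem.Dict.insert d (PySem.Str.slice text (some i) (some (i + k)))
            ((PySem.Dict.getD d (PySem.Str.slice text (some i) (some (i + k))) 0) + 1)) := by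
      simp [insB]
    by_cases hfit : i + k ≤ PySem.Str.len text
    · rw [if_pos hfit]
      rw [PySem.List.pyRange_one_cons (by omega), List.foldl_cons, ← hins]
      by_cases hlt : i + k < PySem.Str.len text
      · exact ih _ (i+1) _ (by omega) (by push_cast at hf ⊢; omega) hlt
      · rw [srcLoop_stop text "" k f _ (i+1) _ (by omega)]
        rw [PySem.List.pyRange_one_eq_nil (by omega)]
        rfl
    · rw [if_neg hfit]
      rw [srcLoop_stop text "" k f d (i+1) _ (by omega)]
      rw [PySem.List.pyRange_one_eq_nil (by omega)]
      rfl

-- B's candidate list for pre == "" and k ≤ 0: all of 0..n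
lemma okPos_empty_pre (text : String) (k : Int) (hk : k ≤ 0) :
    okPos text "" k 0 = PySem.List.pyRange 0 (PySem.Str.len text + 1) 1 := by
  unfold okPos
  have hL : PySem.Str.len ("" : String) = 0 := rfl
  have hN0 : (0:Int) ≤ PySem.Str.len text := by rw [PySem.Str.len_eq]; omega
  rw [PySem.List.pyRange_one_append 0 (PySem.Str.len text + 1) _ (by omega) (by omega),
    List.filter_append]
  have htail : (PySem.List.pyRange (PySem.Str.len text + 1)
      (PySem.Str.len text - PySem.Str.len "" - k + 1)).filter (startsAt text "") = [] := by
    rw [List.filter_eq_nil_iff]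
    intro p hp
    have hpr := PySem.List.mem_pyRange_one.mp hp
    simp only [startsAt_eq_false_of_gt text "" p (by omega), Bool.false_eq_true,
      not_false_eq_true]
  rw [htail, List.append_nil]
  apply List.filter_eq_self.mpr
  intro p hp
  have hpr := PySem.List.mem_pyRange_one.mp hp
  exact startsAt_eq_true text "" p (by omega) (by simp)

-- the counting fold is Counter(blocks)
lemma fold_insB_counter (text pre : String) (k : Int) (l : List Int) :
    l.foldl (insB text pre k) PySem.Dict.empty
      = PySem.Dict.counter (l.map (fun p =>
          PySem.Str.slice text (some (p + PySem.Str.len pre)) (some (p + PySem.Str.len pre + k)))) := by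
  rw [← PySem.Dict.foldl_insert_getD_add_one_eq_counter, List.foldl_map]
  rfl

-- ===== VERDICT (by name: the statement is the Claim_ definition above) =====
theorem source_from_text_spec : Claim_unchanged_source_from_text := by
  intro text k pre _hdom
  unfold Spec_source_from_text
  intro hD
  rw [alt_eq_fold]
  unfold source_from_text
  by_cases hn0 : (0:Int) < PySem.Str.len text
  · have htne : text ≠ "" := by
      intro h
      subst h
      simp [PySem.Str.len_eq] at hn0
    have hk0 : pre = "" → 0 ≤ k := by
      intro hp
      by_contra hneg
      push Not at hneg
      exact hD ⟨hp, Or.inl ⟨hneg, htne⟩⟩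
    rw [srcLoop_eq text pre k _ PySem.Dict.empty 0 0 le_rfl (le_of_lt hn0)
      (by rw [PySem.Str.len_eq]; omega) hn0 hk0]
  · rw [srcLoop_stop text pre k _ PySem.Dict.empty 0 0 hn0]
    have htext : text.toList = [] := by
      rw [PySem.Str.len_eq] at hn0
      have : text.toList.length = 0 := by omega
      exact List.length_eq_zero_iff.mp this
    have htext0 : text = "" := String.toList_inj.mp (htext.trans String.toList_empty.symm)
    suffices hok : okPos text pre k 0 = [] by rw [hok]; rfl
    by_cases hp : pre = ""
    · subst hp
      have hk1 : 1 ≤ k := by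
        by_contra hneg
        push Not at hneg
        exact hD ⟨rfl, Or.inr ⟨by omega, htext0⟩⟩
      apply okPos_nil_of_ge
      have h1 : PySem.Str.len text = 0 := by rw [PySem.Str.len_eq, htext]; rfl
      have h2 : PySem.Str.len ("" : String) = 0 := rfl
      omega
    · apply okPos_nil_of_none
      intro p _hp0 _hpm
      apply startsAt_eq_false
      intro hpref
      rw [htext, List.drop_nil] at hpref
      exact hp (String.toList_inj.mp ((List.prefix_nil.mp hpref).trans String.toList_empty.symm))

theorem source_from_text_changed : Claim_changed_source_from_text := by
  unfold Claim_changed_source_from_text; decide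

theorem source_from_text_tight : Claim_exact_source_from_text := by
  intro text k pre _hdom hD
  obtain ⟨hpre, hcase⟩ := hD
  subst hpre
  have hL : PySem.Str.len ("" : String) = 0 := rfl
  rcases hcase with ⟨hk, hne⟩ | ⟨hk, heq⟩
  · -- text ≠ "", k < 0: A counts -k phantom empty blocks past the end
    have hn0 : (0:Int) < PySem.Str.len text := by
      rw [PySem.Str.len_eq]
      have : text.toList ≠ [] := fun h => hne (String.toList_inj.mp (h.trans String.toList_empty.symm))
      have := List.length_pos_iff.mpr this
      omega
    have hA : source_from_text text k ""
        = PySem.List.sorted2 (PySem.Dict.counter ((PySem.List.pyRange 0 (PySem.Str.len text - k + 1)).map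
            (fun p => PySem.Str.slice text (some (p + PySem.Str.len "")) (some (p + PySem.Str.len "" + k))))).items
            (fun p => p.1.toList) (fun p => p.2) := by
      unfold source_from_text
      rw [srcLoop_neg_eq text k hk _ PySem.Dict.empty 0 0 le_rfl
        (by rw [PySem.Str.len_eq]; omega) hn0]
      rw [fold_insB_counter]
    have hB : source_from_text_alt text k ""
        = PySem.List.sorted2 (PySem.Dict.counter ((PySem.List.pyRange 0 (PySem.Str.len text + 1)).map
            (fun p => PySem.Str.slice text (some (p + PySem.Str.len "")) (some (p + PySem.Str.len "" + k))))).items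
            (fun p => p.1.toList) (fun p => p.2) := by
      rw [alt_eq_fold, okPos_empty_pre text k (le_of_lt hk), fold_insB_counter]
    intro hcontra
    rw [hA, hB] at hcontra
    -- the two block multisets: B's blocks plus -k extra '' blocks
    set blk := fun p : Int => PySem.Str.slice text (some (p + PySem.Str.len "")) (some (p + PySem.Str.len "" + k)) with hblk
    set bB := (PySem.List.pyRange 0 (PySem.Str.len text + 1)).map blk with hbB
    set bE := (PySem.List.pyRange (PySem.Str.len text + 1) (PySem.Str.len text - k + 1)).map blk with hbE
    have hsplit : (PySem.List.pyRange 0 (PySem.Str.len text - k + 1)).map blk = bB ++ bE := by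
      rw [hbB, hbE, ← List.map_append, ← PySem.List.pyRange_one_append 0 (PySem.Str.len text + 1) _ (by omega) (by omega)]
    have hEempty : ∀ b ∈ bE, b = "" := by
      intro b hb
      rw [hbE] at hb
      obtain ⟨p, hp, hpb⟩ := List.mem_map.mp hb
      have hpr := PySem.List.mem_pyRange_one.mp hp
      rw [← hpb, hblk]
      simp only [hL, add_zero]
      exact block_empty_of_ge text k p (by omega) (by rw [← PySem.Str.len_eq]; omega)
    have hElen : 1 ≤ bE.length := by
      rw [hbE, List.length_map, PySem.List.length_pyRange_one]
      omega
    have hEmem : "" ∈ bE := by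
      have hpos : 0 < bE.length := hElen
      obtain ⟨b, hb⟩ := List.exists_mem_of_length_pos hpos
      exact (hEempty b hb) ▸ hb
    have hcount : List.count "" (bB ++ bE) = List.count "" bB + bE.length := by
      rw [List.count_append]
      congr 1
      exact List.count_eq_length.mpr (fun b hb => (hEempty b hb).symm)
    -- permute the two sorted outputs back to the counter items
    have hperm : (PySem.Dict.counter (bB ++ bE)).items.Perm (PySem.Dict.counter bB).items := by
      have p1 := PySem.List.sorted2_perm (PySem.Dict.counter (bB ++ bE)).items
        (fun p : String × Int => p.1.toList) (fun p => p.2) false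
      have p2 := PySem.List.sorted2_perm (PySem.Dict.counter bB).items
        (fun p : String × Int => p.1.toList) (fun p => p.2) false
      rw [hsplit] at hcontra
      exact p1.symm.trans (hcontra ▸ p2)
    have hmemA : ("", (List.count "" (bB ++ bE) : Int)) ∈ (PySem.Dict.counter (bB ++ bE)).items := by
      rw [PySem.Dict.items_counter]
      exact List.mem_map.mpr ⟨"", (PySem.Set.mem_ofList _ _).mpr (List.mem_append.mpr (Or.inr hEmem)), rfl⟩
    have hmemB := hperm.mem_iff.mp hmemA
    rw [PySem.Dict.items_counter] at hmemB
    obtain ⟨b, _hbmem, hbeq⟩ := List.mem_map.mp hmemB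
    have hb1 : b = "" := (congrArg Prod.fst hbeq)
    have hb2 : (List.count "" (bB ++ bE) : Int) = (List.count b bB : Int) := (congrArg Prod.snd hbeq).symm
    rw [hb1] at hb2
    rw [hcount] at hb2
    omega
  · -- text = "", k ≤ 0: A returns [], B counts one empty block
    subst heq
    have hA : source_from_text "" k "" = [] := by
      unfold source_from_text
      rw [srcLoop_stop "" "" k _ PySem.Dict.empty 0 0 (by rw [hL]; omega)]
      rfl
    have hokp : okPos "" "" k 0 = [0] := by
      unfold okPos
      rw [hL]
      rw [PySem.List.pyRange_one_cons (by omega)]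
      rw [List.filter_cons_of_pos (by rfl)]
      have htail : (PySem.List.pyRange (0+1) (0 - 0 - k + 1)).filter (startsAt "" "") = [] := by
        rw [List.filter_eq_nil_iff]
        intro p hp
        have hpr := PySem.List.mem_pyRange_one.mp hp
        simp only [startsAt_eq_false_of_gt "" "" p (by rw [hL]; omega), Bool.false_eq_true,
          not_false_eq_true]
      rw [htail]
    intro hcontra
    rw [hA, alt_eq_fold, hokp] at hcontra
    have hlen := congrArg List.length hcontra
    rw [(PySem.List.sorted2_perm _ _ _ _).length_eq] at hlen
    have hitems : (List.foldl (insB "" "" k) PySem.Dict.empty [0]).items.length = 1 := rfl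
    rw [hitems] at hlen
    exact Nat.noConfusion hlen
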